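-- pv_equiv track=rewrite | github.com/road-2-code/road-2-code | scenic_finetune/model.py | extract_behavior
-- ===== SOURCE A (Python) =====
-- def extract_behavior(data):
--     behavior_descriptions = ""
--
--     for car_index, car_data in enumerate(data, start=1):
--         behavior_descriptions += f"Car {car_index}:\n"
--         for i in range(0, len(car_data), 2):  # Iterate in pairs for 0.5-second intervals
--             if car_data[i] != 'No Data' and i + 1 < len(car_data) and car_data[i + 1] != 'No Data':
--                 behavior_descriptions += f"  {car_data[i][0]} for 1.0 seconds\n"
--                 behavior_descriptions += f"  {car_data[i + 1][0]} for 1.0 seconds\n"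
--             elif car_data[i] != 'No Data':
--                 behavior_descriptions += f"  {car_data[i][0]} for 1.0 seconds\n"
--             elif i + 1 < len(car_data) and car_data[i + 1] != 'No Data':
--                 behavior_descriptions += f"  {car_data[i + 1][0]} for 1.0 seconds\n"
--
--     return behavior_descriptions.strip()
-- ===== SOURCE B (Python) =====
-- def extract_behavior(data):
--     pieces = []
--     for car_index in range(len(data)):
--         pieces.append(f"Car {car_index + 1}:\n")
--         car_data = data[car_index]
--         for i in range(len(car_data)):
--             if car_data[i] != 'No Data':
--                 pieces.append(f"  {car_data[i][0]} for 1.0 seconds\n")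
--     return "".join(pieces).strip()
-- ===== Notes on version B (the rewrite author's own statement) =====
-- stated objective: simpler
-- what changed: Replaced the pairwise range(0,len,2) stepping with its three-branch case analysis by a single flat scan that emits one line per non-'No Data' element, accumulating the lines in a list joined once instead of a growing string.
import Mathlib
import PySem

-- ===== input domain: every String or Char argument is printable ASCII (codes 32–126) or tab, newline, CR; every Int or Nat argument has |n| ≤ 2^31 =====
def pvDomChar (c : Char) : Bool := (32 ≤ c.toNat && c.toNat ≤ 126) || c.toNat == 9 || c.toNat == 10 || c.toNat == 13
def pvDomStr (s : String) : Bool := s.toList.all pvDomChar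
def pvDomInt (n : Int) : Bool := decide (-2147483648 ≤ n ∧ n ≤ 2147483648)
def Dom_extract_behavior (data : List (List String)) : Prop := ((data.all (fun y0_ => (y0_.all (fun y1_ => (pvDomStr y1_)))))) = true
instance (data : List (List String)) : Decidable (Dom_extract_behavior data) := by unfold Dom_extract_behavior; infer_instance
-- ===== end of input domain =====

-- B replaces A's pairwise stepping (range step 2 with three branches) by one flat scan collecting
-- the lines in a list joined once; objective: simpler. Equivalence is on the return value.

-- ===== PORT A =====
-- car_data[i][0]: first character of the 1-char Python slice; Pre_ rules out the empty
-- non-'No Data' strings on which Python raises IndexError, so the ' ' default is never reached.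
def pvFirstCharA (s : String) : String := String.singleton ((PySem.Str.pyGet? s 0).getD ' ')

-- the body of A's inner `for i in range(0, len(car_data), 2)` loop
def pvStepA (car_data : List String) (bd : String) (i : Int) : String :=
  if PySem.List.pyGetD car_data i "" ≠ "No Data" ∧ i + 1 < PySem.List.len car_data ∧
      PySem.List.pyGetD car_data (i + 1) "" ≠ "No Data" then
    bd ++ ("  " ++ pvFirstCharA (PySem.List.pyGetD car_data i "") ++ " for 1.0 seconds\n")
       ++ ("  " ++ pvFirstCharA (PySem.List.pyGetD car_data (i + 1) "") ++ " for 1.0 seconds\n")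
  else if PySem.List.pyGetD car_data i "" ≠ "No Data" then
    bd ++ ("  " ++ pvFirstCharA (PySem.List.pyGetD car_data i "") ++ " for 1.0 seconds\n")
  else if i + 1 < PySem.List.len car_data ∧ PySem.List.pyGetD car_data (i + 1) "" ≠ "No Data" then
    bd ++ ("  " ++ pvFirstCharA (PySem.List.pyGetD car_data (i + 1) "") ++ " for 1.0 seconds\n")
  else bd

-- the body of A's outer `for car_index, car_data in enumerate(data, start=1)` loop
def pvCarA (bd : String) (p : Int × List String) : String :=
  (PySem.List.pyRange 0 (PySem.List.len p.2) 2).foldl (pvStepA p.2)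
    (bd ++ ("Car " ++ PySem.Int.toStr p.1 ++ ":\n"))

def extract_behavior (data : List (List String)) : String :=
  PySem.Str.strip ((PySem.List.enumerate data 1).foldl pvCarA "")

-- ===== PORT B =====
def pvFirstCharB (s : String) : String := String.singleton ((PySem.Str.pyGet? s 0).getD ' ')

-- body of B's inner flat `for i in range(len(car_data))` loop
def pvStepB (car_data : List String) (pieces : List String) (i : Int) : List String :=
  if PySem.List.pyGetD car_data i "" ≠ "No Data" then
    pieces ++ ["  " ++ pvFirstCharB (PySem.List.pyGetD car_data i "") ++ " for 1.0 seconds\n"]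
  else pieces

-- body of B's outer `for car_index in range(len(data))` loop
def pvCarB (data : List (List String)) (pieces : List String) (ci : Int) : List String :=
  (PySem.List.pyRange 0 (PySem.List.len (PySem.List.pyGetD data ci [])) 1).foldl
    (pvStepB (PySem.List.pyGetD data ci []))
    (pieces ++ ["Car " ++ PySem.Int.toStr (ci + 1) ++ ":\n"])

def extract_behavior_alt (data : List (List String)) : String :=
  PySem.Str.strip (PySem.Str.join ""
    ((PySem.List.pyRange 0 (PySem.List.len data) 1).foldl (pvCarB data) []))

-- ===== PRECONDITION & SPEC =====
-- Pre_ excludes exactly the inputs on which the Python A raises IndexError: an empty string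
-- element that is not 'No Data' (''[0] fails).  B raises the same IndexError there.
def Pre_extract_behavior (data : List (List String)) : Prop :=
  ∀ c ∈ data, ∀ s ∈ c, s = "No Data" ∨ s ≠ ""
instance (data : List (List String)) : Decidable (Pre_extract_behavior data) := by
  unfold Pre_extract_behavior; infer_instance

def pvWitness_extract_behavior : List (List String) :=
  [["Turn left", "No Data", "Stop"], [], ["No Data"]]

def Spec_extract_behavior (data : List (List String)) (out : String) : Prop := out = extract_behavior_alt data
instance (data : List (List String)) (out : String) : Decidable (Spec_extract_behavior data out) := by unfold Spec_extract_behavior; infer_instance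

-- ===== CLAIM (what is proved, stated in full; the proofs are below) =====
def Claim_equal_extract_behavior : Prop := ∀ (data : List (List String)), Dom_extract_behavior data → Pre_extract_behavior data → Spec_extract_behavior data (extract_behavior data)

-- ===== LEMMAS AND PROOFS =====

-- the text both programs emit for one element, one car's lines as text and as a list of lines,
-- and the whole report both loops build
def pvLine (s : String) : String := "  " ++ pvFirstCharA s ++ " for 1.0 seconds\n"

def pvLines : List String → String
  | [] => ""
  | s :: rest => (if s = "No Data" then "" else pvLine s) ++ pvLines rest

def pvLinesList : List String → List String
  | [] => []
  | s :: rest => (if s = "No Data" then [] else [pvLine s]) ++ pvLinesList rest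

def pvSpec : List (List String) → Int → String
  | [], _ => ""
  | c :: cs, s => ("Car " ++ PySem.Int.toStr s ++ ":\n") ++ pvLines c ++ pvSpec cs (s + 1)

def pvSpecList : List (List String) → Int → List String
  | [], _ => []
  | c :: cs, s => ("Car " ++ PySem.Int.toStr s ++ ":\n") :: (pvLinesList c ++ pvSpecList cs (s + 1))

theorem pvRange2_step (m : Nat) :
    PySem.List.pyRange 0 ((m : Int) + 2) 2 = 0 :: (PySem.List.pyRange 0 (m : Int) 2).map (· + 2) := by
  rw [PySem.List.pyRange_of_pos _ _ (by norm_num), PySem.List.pyRange_of_pos _ _ (by norm_num)]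
  have h1 : (if (0:Int) < (m:Int) + 2 then (((m:Int) + 2 - 0 + 2 - 1) / 2).toNat else 0) = ((if (0:Int) < (m:Int) then (((m:Int) - 0 + 2 - 1) / 2).toNat else 0)) + 1 := by
    split_ifs <;> omega
  rw [h1, List.range_succ_eq_map]
  simp only [List.map_cons, List.map_map]
  rw [List.cons_eq_cons]
  refine ⟨by norm_num, ?_⟩
  apply List.map_congr_left
  intro k _
  simp [Function.comp]
  ring

theorem pvGetD_shift (x y : String) (rest : List String) (j : Int) (h : 0 ≤ j) :
    PySem.List.pyGetD (x :: y :: rest) (j + 2) "" = PySem.List.pyGetD rest j "" := by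
  obtain ⟨n, rfl⟩ := Int.eq_ofNat_of_zero_le h
  have h2 : (n : Int) + 2 = ((n + 2 : Nat) : Int) := by push_cast; ring
  rw [h2, PySem.List.pyGetD_natCast, PySem.List.pyGetD_natCast]
  simp [List.getD]

theorem pvStepA_shift (x y : String) (rest : List String) (bd : String) (j : Int) (h : 0 ≤ j) :
    pvStepA (x :: y :: rest) bd (j + 2) = pvStepA rest bd j := by
  unfold pvStepA
  have e1 := pvGetD_shift x y rest j h
  have e2 : PySem.List.pyGetD (x :: y :: rest) (j + 2 + 1) "" = PySem.List.pyGetD rest (j + 1) "" := by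
    have : j + 2 + 1 = (j + 1) + 2 := by ring
    rw [this]; exact pvGetD_shift x y rest (j+1) (by omega)
  have e3 : (j + 2 + 1 < PySem.List.len (x :: y :: rest)) ↔ (j + 1 < PySem.List.len rest) := by
    simp [PySem.List.len]; omega
  rw [e1, e2]
  simp only [e3]

theorem pvInnerA : ∀ (xs : List String) (acc : String),
    (PySem.List.pyRange 0 (PySem.List.len xs) 2).foldl (pvStepA xs) acc = acc ++ pvLines xs
  | [], acc => by
      have : PySem.List.pyRange 0 (PySem.List.len ([] : List String)) 2 = [] := by decide
      rw [this]
      simp [pvLines]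
  | [x], acc => by
      have hl1 : PySem.List.len [x] = 1 := by simp [PySem.List.len]
      have : PySem.List.pyRange 0 (1:Int) 2 = [0] := by decide
      rw [hl1, this]
      simp only [List.foldl_cons, List.foldl_nil, pvStepA, pvLines]
      have h0 : PySem.List.pyGetD [x] 0 "" = x := by
        simp [PySem.List.pyGetD, PySem.List.pyGet?, PySem.List.pyIdx?]
      have hlt : ¬ ((0:Int) + 1 < PySem.List.len [x]) := by simp [PySem.List.len]
      rw [h0]
      by_cases hx : x = "No Data" <;> simp [hx, pvLine]
  | x :: y :: rest, acc => by
      have hl : PySem.List.len (x :: y :: rest) = ((rest.length : Int) + 2) := by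
        simp [PySem.List.len]; ring
      rw [hl, pvRange2_step, List.foldl_cons, List.foldl_map]
      rw [PySem.List.foldl_congr_mem _ _ (fun bd j => pvStepA rest bd j) _
        (fun acc' j hj => by
          have h0 : 0 ≤ j := by
            have := (PySem.List.mem_pyRange_iff_of_pos (by norm_num : (0:Int) < 2) j).1 hj
            omega
          exact pvStepA_shift x y rest acc' j h0)]
      have hlen : (rest.length : Int) = PySem.List.len rest := by simp [PySem.List.len]
      rw [hlen, pvInnerA rest _]
      have hstep : pvStepA (x :: y :: rest) acc 0 =
          acc ++ ((if x = "No Data" then "" else pvLine x) ++ (if y = "No Data" then "" else pvLine y)) := by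
        have hx0 : PySem.List.pyGetD (x :: y :: rest) 0 "" = x := by
          rw [show (0:Int) = ((0:Nat):Int) from rfl, PySem.List.pyGetD_natCast]; rfl
        have hy1 : PySem.List.pyGetD (x :: y :: rest) (0 + 1) "" = y := by
          rw [show (0:Int) + 1 = ((1:Nat):Int) by norm_num, PySem.List.pyGetD_natCast]; rfl
        have hlt : (0:Int) + 1 < PySem.List.len (x :: y :: rest) := by
          simp [PySem.List.len]
        simp only [pvStepA, hx0, hy1]
        by_cases hx : x = "No Data" <;> by_cases hy : y = "No Data" <;>
          simp [hx, hy, pvLine, String.append_assoc]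
      rw [hstep]
      simp [pvLines, String.append_assoc]

theorem pvOuterA : ∀ (cs : List (List String)) (s : Int) (acc : String),
    (PySem.List.enumerate cs s).foldl pvCarA acc = acc ++ pvSpec cs s
  | [], s, acc => by simp [PySem.List.enumerate_nil, pvSpec]
  | c :: cs, s, acc => by
      rw [PySem.List.enumerate_cons, List.foldl_cons]
      show (PySem.List.enumerate cs (s+1)).foldl pvCarA (pvCarA acc (s, c)) = _
      rw [pvOuterA cs (s+1) _]
      show (PySem.List.pyRange 0 (PySem.List.len c) 2).foldl (pvStepA c)
          (acc ++ ("Car " ++ PySem.Int.toStr s ++ ":\n")) ++ pvSpec cs (s+1) = _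
      rw [pvInnerA]
      simp [pvSpec, String.append_assoc]

theorem pvInnerB (xs : List String) (acc : List String) :
    (PySem.List.pyRange 0 (PySem.List.len xs) 1).foldl (pvStepB xs) acc = acc ++ pvLinesList xs := by
  have h := PySem.List.foldl_pyRange_zero_pyGetD' xs ""
    (fun pieces t => if t ≠ "No Data" then
      pieces ++ ["  " ++ pvFirstCharB t ++ " for 1.0 seconds\n"] else pieces) acc
  rw [show PySem.List.len xs = (xs.length : Int) from rfl]
  rw [show pvStepB xs = (fun acc j => (fun pieces t => if t ≠ "No Data" then
      pieces ++ ["  " ++ pvFirstCharB t ++ " for 1.0 seconds\n"] else pieces) acc (PySem.List.pyGetD xs j "")) from rfl]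
  rw [h]
  clear h
  induction xs generalizing acc with
  | nil => simp [pvLinesList]
  | cons x rest ih =>
      rw [List.foldl_cons, ih]
      by_cases hx : x = "No Data" <;> simp [hx, pvLinesList, pvLine, pvFirstCharA, pvFirstCharB]

theorem pvOuterB : ∀ (cs : List (List String)) (s : Int) (acc : List String),
    (PySem.List.enumerate cs s).foldl
        (fun pieces (p : Int × List String) =>
          (PySem.List.pyRange 0 (PySem.List.len p.2) 1).foldl (pvStepB p.2)
            (pieces ++ ["Car " ++ PySem.Int.toStr (p.1 + 1) ++ ":\n"])) acc
      = acc ++ pvSpecList cs (s + 1)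
  | [], s, acc => by simp [PySem.List.enumerate_nil, pvSpecList]
  | c :: cs, s, acc => by
      rw [PySem.List.enumerate_cons, List.foldl_cons, pvOuterB cs (s+1) _, pvInnerB]
      simp [pvSpecList]

theorem pvJoin_cons (p : String) (ps : List String) :
    PySem.Str.join "" (p :: ps) = p ++ PySem.Str.join "" ps := by
  apply String.toList_inj.mp
  rw [String.toList_append]
  show (String.ofList (List.intercalate [] (p.toList :: ps.map String.toList))).toList
    = p.toList ++ (String.ofList (List.intercalate [] (ps.map String.toList))).toList
  rw [String.toList_ofList, String.toList_ofList]
  cases ps.map String.toList <;> simp [List.intercalate]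

theorem pvJoin_nil : PySem.Str.join "" [] = "" := rfl

theorem pvJoin_append : ∀ (l1 l2 : List String),
    PySem.Str.join "" (l1 ++ l2) = PySem.Str.join "" l1 ++ PySem.Str.join "" l2
  | [], l2 => by simp [pvJoin_nil]
  | p :: l1, l2 => by
      rw [List.cons_append, pvJoin_cons, pvJoin_append l1 l2, pvJoin_cons]
      rw [String.append_assoc]

theorem pvJoin_lines : ∀ (c : List String), PySem.Str.join "" (pvLinesList c) = pvLines c
  | [] => rfl
  | s :: rest => by
      rw [pvLinesList, pvLines, pvJoin_append, pvJoin_lines rest]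
      by_cases hs : s = "No Data" <;> simp [hs, pvJoin_cons, pvJoin_nil]

theorem pvJoin_spec : ∀ (cs : List (List String)) (s : Int),
    PySem.Str.join "" (pvSpecList cs s) = pvSpec cs s
  | [], _ => rfl
  | c :: cs, s => by
      rw [pvSpecList, pvSpec, pvJoin_cons, pvJoin_append, pvJoin_lines, pvJoin_spec cs (s+1)]
      simp [String.append_assoc]

theorem pv_final (data : List (List String)) : extract_behavior data = extract_behavior_alt data := by
  unfold extract_behavior extract_behavior_alt
  rw [pvOuterA data 1 ""]
  have hb : (PySem.List.pyRange 0 (PySem.List.len data) 1).foldl (pvCarB data) []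
      = (PySem.List.enumerate data).foldl
          (fun pieces (p : Int × List String) =>
            (PySem.List.pyRange 0 (PySem.List.len p.2) 1).foldl (pvStepB p.2)
              (pieces ++ ["Car " ++ PySem.Int.toStr (p.1 + 1) ++ ":\n"])) [] := by
    rw [PySem.List.enumerate_eq_map_pyRange data [], List.foldl_map]
    rfl
  rw [hb, pvOuterB data 0 [], List.nil_append, pvJoin_spec]
  norm_num

-- ===== VERDICT (by name: the statement is the Claim_ definition above) =====
theorem extract_behavior_spec : Claim_equal_extract_behavior := by
  intro data _ _
  unfold Spec_extract_behavior
  exact pv_final data
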